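-- pv_equiv track=rewrite | github.com/cafaray/atco.de-fights | getCoprimeSum4.py | getCoprimeSum
-- ===== SOURCE A (Python) =====
-- def getCoprimeSum(n):
--     v=0
--     n2=(n+1)//2
--     for x in range(n2):
--         y=n
--         while y!=0:
--             x,y = y,x%y
--
--         if x==1: v+=n
--     return v%1000000007
-- ===== SOURCE B (Python) =====
-- MOD = 1000000007
--
-- def getCoprimeSum(n):
--     # Euler totient via trial division; coprimes in [0, ceil(n/2)) are phi(n)//2 of them (by x <-> n-x symmetry)
--     if n <= 0:
--         return 0
--     if n == 1:
--         return 1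
--     m = n
--     phi = n
--     d = 2
--     while d * d <= m:
--         if m % d == 0:
--             while m % d == 0:
--                 m //= d
--             phi -= phi // d
--         d += 1
--     if m > 1:
--         phi -= phi // m
--     return n * (phi // 2) % MOD
-- ===== Notes on version B (the rewrite author's own statement) =====
-- stated objective: faster
-- what changed: Replaces the per-residue Euclid gcd scan over range((n+1)//2) by a single O(sqrt n) trial-division computation of Euler's totient, using the x <-> n-x symmetry to get the half-range coprime count as phi(n)//2.
import Mathlib
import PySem

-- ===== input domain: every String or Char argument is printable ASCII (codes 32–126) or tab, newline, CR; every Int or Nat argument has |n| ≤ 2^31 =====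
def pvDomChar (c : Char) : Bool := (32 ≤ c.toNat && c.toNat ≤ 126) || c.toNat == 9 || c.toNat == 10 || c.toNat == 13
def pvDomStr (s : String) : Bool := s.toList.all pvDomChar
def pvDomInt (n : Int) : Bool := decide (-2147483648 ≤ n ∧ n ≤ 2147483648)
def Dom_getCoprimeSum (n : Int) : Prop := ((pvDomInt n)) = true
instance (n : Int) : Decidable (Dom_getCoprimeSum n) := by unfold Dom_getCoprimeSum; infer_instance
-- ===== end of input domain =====

-- B replaces A's per-residue Euclid scan over range((n+1)//2) by trial-division computation
-- of Euler's totient (half-range coprime count = φ(n)//2 by the x ↔ n-x symmetry): faster.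

-- ===== PORT A =====
-- the inner 'while y!=0: x,y = y,x%y' loop of A
def pyGcdLoop (x y : Int) : Int :=
  if h : y = 0 then x else pyGcdLoop y (PySem.Int.mod x y)
termination_by y.natAbs
decreasing_by
  rcases lt_trichotomy y 0 with hy | hy | hy
  · have h1 := PySem.Int.mod_neg_bounds x hy
    omega
  · exact absurd hy h
  · have h1 := PySem.Int.mod_nonneg x hy
    have h2 := PySem.Int.mod_lt x hy
    omega

def getCoprimeSum (n : Int) : Int :=
  PySem.Int.mod
    ((PySem.List.pyRange 0 (PySem.Int.floordiv (n + 1) 2) 1).foldl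
      (fun v x => if pyGcdLoop x n = 1 then v + n else v) 0)
    1000000007

-- ===== PORT B =====
-- inner 'while m % d == 0: m //= d' loop of B (fuel is only a totality guard)
def divOut (fuel : Nat) (m d : Int) : Int :=
  match fuel with
  | 0 => m
  | f + 1 => if PySem.Int.mod m d = 0 then divOut f (PySem.Int.floordiv m d) d else m

-- outer 'while d*d <= m' loop of B; returns the final (m, phi) (fuel is only a totality guard)
def phiLoop (fuel : Nat) (m phi d : Int) : Int × Int :=
  match fuel with
  | 0 => (m, phi)
  | f + 1 =>
    if d * d ≤ m then
      if PySem.Int.mod m d = 0 then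
        phiLoop f (divOut m.natAbs m d) (phi - PySem.Int.floordiv phi d) (d + 1)
      else phiLoop f m phi (d + 1)
    else (m, phi)

def getCoprimeSum_alt (n : Int) : Int :=
  if n ≤ 0 then 0
  else if n = 1 then 1
  else
    let p := phiLoop n.toNat n n 2
    let phi := if 1 < p.1 then p.2 - PySem.Int.floordiv p.2 p.1 else p.2
    PySem.Int.mod (n * PySem.Int.floordiv phi 2) 1000000007

-- ===== PRECONDITION & SPEC =====
def Spec_getCoprimeSum (n : Int) (out : Int) : Prop := out = getCoprimeSum_alt n
instance (n : Int) (out : Int) : Decidable (Spec_getCoprimeSum n out) := by unfold Spec_getCoprimeSum; infer_instance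

-- ===== CLAIM (what is proved, stated in full; the proofs are below) =====
def Claim_equal_getCoprimeSum : Prop := ∀ (n : Int), Dom_getCoprimeSum n → Spec_getCoprimeSum n (getCoprimeSum n)

-- ===== LEMMAS AND PROOFS =====

-- A's hand-rolled Euclid computes the gcd
lemma pyGcdLoop_eq_gcd_fuel (N : ℕ) : ∀ (x y : Int), 0 ≤ x → 0 ≤ y → y.natAbs ≤ N →
    pyGcdLoop x y = (Nat.gcd x.toNat y.toNat : Int) := by
  induction N with
  | zero =>
    intro x y hx hy hN
    have hy0 : y = 0 := by omega
    subst hy0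
    rw [pyGcdLoop]
    simp [Int.toNat_of_nonneg hx]
  | succ N ih =>
    intro x y hx hy hN
    by_cases hy0 : y = 0
    · subst hy0
      rw [pyGcdLoop]
      simp [Int.toNat_of_nonneg hx]
    · rw [pyGcdLoop, dif_neg hy0]
      have hypos : 0 < y := by omega
      rw [PySem.Int.mod_eq_emod_of_pos hypos]
      have hr0 : 0 ≤ x % y := Int.emod_nonneg x hy0
      have hr1 : x % y < y := Int.emod_lt_of_pos x hypos
      rw [ih y (x % y) hy hr0 (by omega)]
      have hmt : (x % y).toNat = x.toNat % y.toNat := by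
        have hxy : (x % y) = ((x.toNat % y.toNat : ℕ) : Int) := by
          push_cast
          rw [Int.toNat_of_nonneg hx, Int.toNat_of_nonneg hy]
        rw [hxy, Int.toNat_natCast]
      rw [hmt, Nat.gcd_comm, ← Nat.gcd_rec, Nat.gcd_comm]

lemma pyGcdLoop_eq_gcd (x y : Int) (hx : 0 ≤ x) (hy : 0 ≤ y) :
    pyGcdLoop x y = (Nat.gcd x.toNat y.toNat : Int) :=
  pyGcdLoop_eq_gcd_fuel y.natAbs x y hx hy le_rfl

-- A's accumulation 'if coprime: v += n' is n times a count
lemma foldl_count (l : List Int) (c : Int) (q : Int → Prop) [DecidablePred q] :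
    ∀ a : Int, l.foldl (fun v x => if q x then v + c else v) a
      = a + c * (l.countP (fun x => decide (q x)) : Int) := by
  induction l with
  | nil => intro a; simp
  | cons x l ih =>
    intro a
    simp only [List.foldl_cons, List.countP_cons, ih]
    by_cases h : q x
    · simp only [h, if_pos, decide_true]
      push_cast
      ring
    · simp only [h, decide_false]
      push_cast
      ring

-- List.countP over List.range as a Finset card
lemma countP_range_eq_card (p : ℕ → Bool) : ∀ (K : ℕ),
    (List.range K).countP p = ((Finset.range K).filter (fun x => p x = true)).card := by
  intro K
  induction K with
  | zero => rfl
  | succ k ih =>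
    rw [List.range_succ, List.countP_append, Finset.range_add_one, Finset.filter_insert]
    by_cases h : p k
    · rw [if_pos h, Finset.card_insert_of_notMem (by simp)]
      simp [h, ih]
    · rw [if_neg (by simp [h])]
      simp [h, ih]

-- the x ↔ n-x symmetry: coprime residues below ⌈n/2⌉ are half of all of them
lemma half_totient (n : ℕ) (hn : 3 ≤ n) :
    2 * ((Finset.range ((n + 1) / 2)).filter (fun x => Nat.gcd x n = 1)).card = n.totient := by
  have hLow : (Finset.range ((n + 1) / 2)).filter (fun x => Nat.gcd x n = 1)
      = (Finset.range n).filter (fun x => Nat.gcd x n = 1 ∧ 2 * x < n) := by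
    ext x
    simp only [Finset.mem_filter, Finset.mem_range]
    constructor
    · rintro ⟨h1, h2⟩; exact ⟨by omega, h2, by omega⟩
    · rintro ⟨h1, h2, h3⟩; exact ⟨by omega, h2⟩
  have hx0 : ∀ x, Nat.gcd x n = 1 → 2 * x ≠ n := by
    intro x hco he
    have hdx : x ∣ n := ⟨2, by omega⟩
    have hgl := Nat.gcd_eq_left hdx
    omega
  have hgolden : ∀ x, x < n → Nat.gcd x n = 1 → n < 2 * x → Nat.gcd (n - x) n = 1 ∧ 2 * (n - x) < n := by
    intro x hlt hco hhi
    constructor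
    · calc Nat.gcd (n - x) n = Nat.gcd n (n - x) := Nat.gcd_comm _ _
        _ = Nat.gcd n x := Nat.gcd_self_sub_right (by omega)
        _ = Nat.gcd x n := Nat.gcd_comm _ _
        _ = 1 := hco
    · omega
  have hbij : ((Finset.range n).filter (fun x => Nat.gcd x n = 1 ∧ 2 * x < n)).card
      = ((Finset.range n).filter (fun x => Nat.gcd x n = 1 ∧ n < 2 * x)).card := by
    apply Finset.card_bij (fun x _ => n - x)
    · intro a ha
      simp only [Finset.mem_filter, Finset.mem_range] at ha ⊢
      obtain ⟨h1, h2, h3⟩ := ha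
      have ha1 : 1 ≤ a := by
        by_contra h
        have ha0 : a = 0 := by omega
        rw [ha0] at h2
        simp at h2
        omega
      refine ⟨by omega, ?_, by omega⟩
      calc Nat.gcd (n - a) n = Nat.gcd n (n - a) := Nat.gcd_comm _ _
        _ = Nat.gcd n a := Nat.gcd_self_sub_right (by omega)
        _ = Nat.gcd a n := Nat.gcd_comm _ _
        _ = 1 := h2
    · intro a ha b hb hab
      simp only [Finset.mem_filter, Finset.mem_range] at ha hb
      omega
    · intro b hb
      simp only [Finset.mem_filter, Finset.mem_range] at hb
      obtain ⟨h1, h2, h3⟩ := hb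
      have hmem : n - b ∈ (Finset.range n).filter (fun x => Nat.gcd x n = 1 ∧ 2 * x < n) := by
        simp only [Finset.mem_filter, Finset.mem_range]
        obtain ⟨hg, hl⟩ := hgolden b h1 h2 h3
        exact ⟨by omega, hg, hl⟩
      exact ⟨n - b, hmem, by omega⟩
  have hneg : ((Finset.range n).filter (fun x => Nat.gcd x n = 1)).filter (fun x => ¬ 2 * x < n)
      = ((Finset.range n).filter (fun x => Nat.gcd x n = 1)).filter (fun x => n < 2 * x) := by
    apply Finset.filter_congr
    intro x hx
    simp only [Finset.mem_filter] at hx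
    have hne := hx0 x hx.2
    constructor
    · intro h; omega
    · intro h; omega
  have hsplit := Finset.card_filter_add_card_filter_not
      (s := (Finset.range n).filter (fun x => Nat.gcd x n = 1)) (p := fun x => 2 * x < n)
  rw [hneg, Finset.filter_filter, Finset.filter_filter] at hsplit
  have htot : ((Finset.range n).filter (fun x => Nat.gcd x n = 1)).card = n.totient := by
    rw [Nat.totient]
    congr 1
    apply Finset.filter_congr
    intro x _
    rw [Nat.Coprime, Nat.gcd_comm]
  rw [hLow]
  omega

-- divOut strips all factors d from m
lemma divOut_spec (fuel : ℕ) : ∀ (m d : Int), 0 < m → 2 ≤ d → m.natAbs ≤ fuel →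
    ∃ (k : ℕ) (m₂ : Int), divOut fuel m d = m₂ ∧ m = d ^ k * m₂ ∧ ¬ (d ∣ m₂) ∧ 0 < m₂ ∧
      (d ∣ m → 1 ≤ k) := by
  induction fuel with
  | zero => intro m d hm hd hf; omega
  | succ f ih =>
    intro m d hm hd hf
    by_cases hdvd : d ∣ m
    · have hmod : PySem.Int.mod m d = 0 := (PySem.Int.mod_eq_zero_iff_dvd m d).mpr hdvd
      have hq : PySem.Int.floordiv m d = m / d := PySem.Int.floordiv_eq_ediv_of_pos (by omega)
      have hmd : m = d * (m / d) := (Int.mul_ediv_cancel' hdvd).symm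
      have hqpos : 0 < m / d := by
        by_cases h : m / d ≤ 0
        · have hnp : d * (m / d) ≤ 0 := mul_nonpos_of_nonneg_of_nonpos (by omega) h
          rw [← hmd] at hnp
          omega
        · omega
      have hlt : m / d < m := by nlinarith [hmd, hqpos]
      obtain ⟨k, m₂, h1, h2, h3, h4, _⟩ := ih (m / d) d hqpos hd (by omega)
      refine ⟨k + 1, m₂, ?_, ?_, h3, h4, fun _ => by omega⟩
      · simp only [divOut]
        rw [if_pos hmod, hq]
        exact h1
      · rw [hmd, h2, pow_succ]
        ring
    · have hmod : ¬ PySem.Int.mod m d = 0 := by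
        rw [PySem.Int.mod_eq_zero_iff_dvd]; exact hdvd
      refine ⟨0, m, ?_, by simp, hdvd, hm, fun h => absurd h hdvd⟩
      simp only [divOut]
      rw [if_neg hmod]

-- the trial-division loop (with its closing 'if m > 1' step) computes P·φ(m)
lemma phiLoop_spec (fuel : ℕ) : ∀ (m phi d P : Int), 0 < m → 2 ≤ d → phi = P * m →
    (∀ p : ℕ, p.Prime → (p : Int) ∣ m → d ≤ (p : Int)) → m + 1 ≤ (fuel : Int) + d →
    (if 1 < (phiLoop fuel m phi d).1 then
        (phiLoop fuel m phi d).2 -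
          PySem.Int.floordiv (phiLoop fuel m phi d).2 (phiLoop fuel m phi d).1
      else (phiLoop fuel m phi d).2) = P * (Nat.totient m.natAbs : Int) := by
  induction fuel with
  | zero =>
    intro m phi d P hm hd hphi hfac hfuel
    have hm1 : m = 1 := by
      by_contra h
      have hq2 : 2 ≤ m.natAbs := by omega
      have hqp := Nat.minFac_prime (n := m.natAbs) (by omega)
      have hqdvd : (m.natAbs.minFac : Int) ∣ m := by
        have h1 : (m.natAbs.minFac : Int) ∣ (m.natAbs : Int) :=
          Int.natCast_dvd_natCast.mpr (Nat.minFac_dvd m.natAbs)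
        rwa [Int.natAbs_of_nonneg (by omega : (0:Int) ≤ m)] at h1
      have hge := hfac _ hqp hqdvd
      have hle : m.natAbs.minFac ≤ m.natAbs := Nat.le_of_dvd (by omega) (Nat.minFac_dvd m.natAbs)
      push_cast at hfuel
      omega
    subst hm1
    simp [phiLoop, hphi, Nat.totient_one]
  | succ f ih =>
    intro m phi d P hm hd hphi hfac hfuel
    by_cases hloop : d * d ≤ m
    · simp only [phiLoop]
      by_cases hdvd : d ∣ m
      · have hmod : PySem.Int.mod m d = 0 := (PySem.Int.mod_eq_zero_iff_dvd m d).mpr hdvd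
        rw [if_pos hloop, if_pos hmod]
        -- d is prime
        have hdp : d.natAbs.Prime := by
          have hq2 : 2 ≤ d.natAbs := by omega
          have hqp := Nat.minFac_prime (n := d.natAbs) (by omega)
          have hqd : (d.natAbs.minFac : Int) ∣ d := by
            have h1 : (d.natAbs.minFac : Int) ∣ (d.natAbs : Int) :=
              Int.natCast_dvd_natCast.mpr (Nat.minFac_dvd d.natAbs)
            rwa [Int.natAbs_of_nonneg (by omega : (0:Int) ≤ d)] at h1
          have hqm : (d.natAbs.minFac : Int) ∣ m := hqd.trans hdvd
          have hge := hfac _ hqp hqm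
          have hle : d.natAbs.minFac ≤ d.natAbs := Nat.le_of_dvd (by omega) (Nat.minFac_dvd d.natAbs)
          have heq : d.natAbs.minFac = d.natAbs := by omega
          rwa [heq] at hqp
        obtain ⟨k, m₂, hdo, hme, hnd, hm₂, hk1⟩ := divOut_spec m.natAbs m d hm hd le_rfl
        have hk : 1 ≤ k := hk1 hdvd
        rw [hdo]
        have hpow : d ^ k = d * d ^ (k - 1) := by
          conv_lhs => rw [show k = 1 + (k - 1) by omega]
          rw [pow_add, pow_one]
        have hflr : PySem.Int.floordiv phi d = P * d ^ (k - 1) * m₂ := by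
          rw [PySem.Int.floordiv_eq_ediv_of_pos (by omega)]
          have hrw : phi = d * (P * d ^ (k - 1) * m₂) := by
            rw [hphi, hme, hpow]; ring
          rw [hrw, Int.mul_ediv_cancel_left _ (by omega : d ≠ 0)]
        have hphi' : phi - PySem.Int.floordiv phi d = (P * (d ^ (k - 1) * (d - 1))) * m₂ := by
          rw [hflr, hphi, hme, hpow]; ring
        have hm₂le : m₂ ≤ m := by
          have hp1 : (1 : Int) ≤ d ^ k := one_le_pow₀ (by omega)
          nlinarith
        have happ := ih m₂ (phi - PySem.Int.floordiv phi d) (d + 1) (P * (d ^ (k - 1) * (d - 1)))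
          hm₂ (by omega) hphi'
          (fun p hp hpd => by
            have hpm : (p : Int) ∣ m := by
              rw [hme]; exact Dvd.dvd.mul_left hpd (d ^ k)
            have h1 := hfac p hp hpm
            have h2 : (p : Int) ≠ d := by
              intro he
              exact hnd (he ▸ hpd)
            omega)
          (by push_cast at hfuel ⊢; omega)
        rw [happ]
        have hmnat : m.natAbs = d.natAbs ^ k * m₂.natAbs := by
          calc m.natAbs = (d ^ k * m₂).natAbs := by rw [← hme]
            _ = (d ^ k).natAbs * m₂.natAbs := Int.natAbs_mul _ _
            _ = d.natAbs ^ k * m₂.natAbs := by rw [Int.natAbs_pow]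
        have hcop : (d.natAbs ^ k).Coprime m₂.natAbs := by
          apply Nat.Coprime.pow_left
          apply (Nat.Prime.coprime_iff_not_dvd hdp).mpr
          intro hdn
          exact hnd (Int.natAbs_dvd_natAbs.mp hdn)
        rw [hmnat, Nat.totient_mul hcop, Nat.totient_prime_pow hdp hk]
        have hdn : ((d.natAbs : ℕ) : Int) = d := Int.natAbs_of_nonneg (by omega)
        rw [Nat.cast_mul, Nat.cast_mul, Nat.cast_pow, Nat.cast_sub (by omega : 1 ≤ d.natAbs),
          hdn, Nat.cast_one]
        ring
      · have hmod : ¬ PySem.Int.mod m d = 0 := by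
          rw [PySem.Int.mod_eq_zero_iff_dvd]; exact hdvd
        rw [if_pos hloop, if_neg hmod]
        exact ih m phi (d + 1) P hm (by omega) hphi
          (fun p hp hpd => by
            have h1 := hfac p hp hpd
            have h2 : (p : Int) ≠ d := fun he => hdvd (he ▸ hpd)
            omega)
          (by push_cast at hfuel ⊢; omega)
    · simp only [phiLoop]
      rw [if_neg hloop]
      by_cases hm1 : 1 < m
      · -- the remaining m is prime
        have hp : m.natAbs.Prime := by
          by_contra hnp
          have hq2 : 2 ≤ m.natAbs := by omega
          have hqp := Nat.minFac_prime (n := m.natAbs) (by omega)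
          have hsq := Nat.minFac_sq_le_self (by omega : 0 < m.natAbs) hnp
          have hqd : (m.natAbs.minFac : Int) ∣ m := by
            have h1 : (m.natAbs.minFac : Int) ∣ (m.natAbs : Int) :=
              Int.natCast_dvd_natCast.mpr (Nat.minFac_dvd m.natAbs)
            rwa [Int.natAbs_of_nonneg (by omega : (0:Int) ≤ m)] at h1
          have hge := hfac _ hqp hqd
          have hdd : d * d ≤ (m.natAbs.minFac : Int) * (m.natAbs.minFac : Int) :=
            mul_le_mul hge hge (by omega) (by positivity)
          have hqq : ((m.natAbs.minFac * m.natAbs.minFac : ℕ) : Int) ≤ m := by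
            have h2 : m.natAbs.minFac * m.natAbs.minFac ≤ m.natAbs := by
              rw [pow_two] at hsq; exact hsq
            omega
          push_cast at hqq
          have : d * d ≤ m := le_trans hdd hqq
          omega
        have hflr : PySem.Int.floordiv phi m = P := by
          rw [PySem.Int.floordiv_eq_ediv_of_pos hm, hphi,
            Int.mul_ediv_cancel _ (by omega : m ≠ 0)]
        have hmn : ((m.natAbs : ℕ) : Int) = m := Int.natAbs_of_nonneg (by omega)
        rw [if_pos (by exact hm1), hflr, hphi, Nat.totient_prime hp,
          Nat.cast_sub (by omega : 1 ≤ m.natAbs), hmn, Nat.cast_one]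
        ring
      · have hm1' : m = 1 := by omega
        subst hm1'
        simp [hphi]

-- A's value is n · (the number of coprime residues below ⌈n/2⌉), mod 10^9+7
lemma A_eq_count (n : Int) (hn : 1 ≤ n) :
    getCoprimeSum n = PySem.Int.mod
      (n * (((Finset.range ((n.toNat + 1) / 2)).filter (fun x => Nat.gcd x n.toNat = 1)).card : Int))
      1000000007 := by
  unfold getCoprimeSum
  have h1 : n + 1 = ((n.toNat + 1 : ℕ) : Int) := by omega
  have h2 : PySem.Int.floordiv (n + 1) 2 = (((n.toNat + 1) / 2 : ℕ) : Int) := by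
    rw [h1]
    exact_mod_cast PySem.Int.floordiv_natCast (n.toNat + 1) 2
  rw [h2, PySem.List.pyRange_zero_natCast, foldl_count]
  rw [List.countP_map]
  have h3 : ∀ k ∈ List.range ((n.toNat + 1) / 2),
      (((fun x => decide (pyGcdLoop x n = 1)) ∘ (fun k : ℕ => (k : Int))) k = true
        ↔ (fun k : ℕ => decide (Nat.gcd k n.toNat = 1)) k = true) := by
    intro k _
    simp only [Function.comp_apply, decide_eq_true_eq]
    rw [pyGcdLoop_eq_gcd (k : Int) n (by omega) (by omega)]
    simp only [Int.toNat_natCast]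
    omega
  rw [List.countP_congr h3, countP_range_eq_card]
  simp only [decide_eq_true_eq, zero_add]

-- ===== VERDICT (by name: the statement is the Claim_ definition above) =====
theorem getCoprimeSum_spec : Claim_equal_getCoprimeSum := by
  intro n _
  unfold Spec_getCoprimeSum
  by_cases hn : n ≤ 0
  · unfold getCoprimeSum getCoprimeSum_alt
    rw [if_pos hn]
    have ht : PySem.Int.floordiv (n + 1) 2 ≤ 0 := by
      rw [PySem.Int.floordiv_eq_ediv_of_pos (by norm_num : (0:Int) < 2)]
      omega
    rw [PySem.List.pyRange_one_eq_nil ht]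
    simp only [List.foldl_nil]
    rw [PySem.Int.mod_eq_emod_of_pos (by norm_num : (0:Int) < 1000000007)]
    simp
  · by_cases hn3 : n < 3
    · -- n = 1 or n = 2: both sides compute
      have h1 : 1 ≤ n := by omega
      have h2 : n ≤ 2 := by omega
      interval_cases n
      · rw [A_eq_count 1 (by norm_num)]
        decide
      · rw [A_eq_count 2 (by norm_num)]
        decide
    · rw [A_eq_count n (by omega)]
      unfold getCoprimeSum_alt
      rw [if_neg (by omega), if_neg (by omega)]
      have hspec := phiLoop_spec n.toNat n n 2 1 (by omega) le_rfl (by ring)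
        (fun p hp _ => by exact_mod_cast hp.two_le)
        (by omega)
      simp only []
      rw [hspec]
      have hhalf := half_totient n.toNat (by omega)
      have hna : n.natAbs = n.toNat := by omega
      rw [hna, one_mul]
      have hfl : PySem.Int.floordiv ((Nat.totient n.toNat : ℕ) : Int) 2
          = (((Finset.range ((n.toNat + 1) / 2)).filter
              (fun x => Nat.gcd x n.toNat = 1)).card : Int) := by
        rw [← hhalf]
        push_cast
        rw [PySem.Int.floordiv_eq_ediv_of_pos (by norm_num : (0:Int) < 2)]
        exact Int.mul_ediv_cancel_left _ (by norm_num)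
      rw [hfl]
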